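-- pv_equiv track=rewrite | github.com/Joenhle/leetcode | python/最大子段和.py | get_dp3
-- ===== SOURCE A (Python) =====
-- def get_dp3(arr):
--     n = len(arr)
--     dp = [[0 for i in range(n)] for j in range(n)]
--     for i in range(0, n):
--         res = 0
--         for j in range(i, n):
--             res += arr[j]
--             dp[i][j] = res
--     return dp
-- ===== SOURCE B (Python) =====
-- def get_dp3(arr):
--     n = len(arr)
--     P = [0]
--     for x in arr:
--         P.append(P[-1] + x)
--     return [[P[j + 1] - P[i] if j >= i else 0 for j in range(n)] for i in range(n)]
-- ===== Notes on version B (the rewrite author's own statement) =====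
-- stated objective: alternative
-- what changed: B computes one linear prefix-sum array P and fills each cell as the difference P[j+1]-P[i], replacing A's per-row running-sum accumulation into a pre-allocated mutated table.
import Mathlib
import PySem

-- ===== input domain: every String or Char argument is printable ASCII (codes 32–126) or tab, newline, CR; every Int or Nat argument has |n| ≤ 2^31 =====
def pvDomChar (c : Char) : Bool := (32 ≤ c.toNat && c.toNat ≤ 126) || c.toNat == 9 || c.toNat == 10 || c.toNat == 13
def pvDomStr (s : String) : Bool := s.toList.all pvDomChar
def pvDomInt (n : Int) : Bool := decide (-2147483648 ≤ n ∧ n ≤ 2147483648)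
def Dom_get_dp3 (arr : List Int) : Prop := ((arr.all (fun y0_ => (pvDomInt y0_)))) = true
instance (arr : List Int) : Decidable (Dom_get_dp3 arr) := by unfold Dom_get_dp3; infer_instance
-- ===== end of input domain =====

-- B computes one linear prefix-sum array and fills each cell as a difference of two
-- prefix sums, instead of A's per-row running-sum accumulation into a mutated table.

-- ===== PORT A =====
-- inner loop body: res += arr[j]; dp[i][j] = res  (threading (row of dp[i], res))
def innerStep (arr : List Int) (st : List Int × Int) (j : Int) : List Int × Int :=
  let res := st.2 + PySem.List.pyGetD arr j 0
  (st.1.set j.toNat res, res)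

-- outer loop body: run the inner loop on row dp[i], write the mutated row back
def outerStep (arr : List Int) (dp : List (List Int)) (i : Int) : List (List Int) :=
  dp.set i.toNat
    (((PySem.List.pyRange i (arr.length : Int) 1).foldl (innerStep arr)
      ((dp[i.toNat]?).getD [], 0)).1)

def get_dp3 (arr : List Int) : List (List Int) :=
  let n := arr.length
  let dp := (PySem.List.pyRange 0 (n : Int) 1).map
    (fun _ => (PySem.List.pyRange 0 (n : Int) 1).map (fun _ => (0 : Int)))
  (PySem.List.pyRange 0 (n : Int) 1).foldl (outerStep arr) dp

-- ===== PORT B =====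
-- loop body: P.append(P[-1] + x)
def altStepP (P : List Int) (x : Int) : List Int :=
  P ++ [PySem.List.pyGetD P (-1) 0 + x]

def get_dp3_alt (arr : List Int) : List (List Int) :=
  let n := arr.length
  let P := arr.foldl altStepP [0]
  (PySem.List.pyRange 0 (n : Int) 1).map (fun i =>
    (PySem.List.pyRange 0 (n : Int) 1).map (fun j =>
      if i ≤ j then PySem.List.pyGetD P (j + 1) 0 - PySem.List.pyGetD P i 0 else 0))

-- ===== PRECONDITION & SPEC =====
def Spec_get_dp3 (arr : List Int) (out : List (List Int)) : Prop := out = get_dp3_alt arr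
instance (arr : List Int) (out : List (List Int)) : Decidable (Spec_get_dp3 arr out) := by unfold Spec_get_dp3; infer_instance

-- ===== CLAIM (what is proved, stated in full; the proofs are below) =====
def Claim_equal_get_dp3 : Prop := ∀ (arr : List Int), Dom_get_dp3 arr → Spec_get_dp3 arr (get_dp3 arr)

-- ===== LEMMAS AND PROOFS =====

-- A's inner loop: res accumulates prefix-sum differences; cells i..m-1 get set
lemma inner_spec (arr : List Int) (i : Nat) :
    ∀ (m : Nat), i ≤ m → m ≤ arr.length → ∀ (row : List Int) (r0 : Int), row.length = arr.length →
    (((PySem.List.pyRange (i : Int) (m : Int) 1).foldl (innerStep arr) (row, r0)).2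
        = r0 + ((arr.take m).sum - (arr.take i).sum)) ∧
    (((PySem.List.pyRange (i : Int) (m : Int) 1).foldl (innerStep arr) (row, r0)).1.length = arr.length) ∧
    (∀ k : Nat, ((PySem.List.pyRange (i : Int) (m : Int) 1).foldl (innerStep arr) (row, r0)).1[k]?
        = if i ≤ k ∧ k < m then some (r0 + ((arr.take (k+1)).sum - (arr.take i).sum)) else row[k]?) := by
  intro m hm
  induction m, hm using Nat.le_induction with
  | base =>
    intro _ row r0 hrow
    rw [PySem.List.pyRange_one_eq_nil (le_refl _)]
    refine ⟨by simp, hrow, ?_⟩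
    intro k
    have : ¬ (i ≤ k ∧ k < i) := by omega
    simp [this]
  | succ m him ih =>
    intro hlen row r0 hrow
    have hm' : m ≤ arr.length := by omega
    have hmlt : m < arr.length := by omega
    have hcast : ((m + 1 : Nat) : Int) = (m : Int) + 1 := by push_cast; ring
    rw [hcast, PySem.List.pyRange_one_succ_right (by exact_mod_cast him), List.foldl_append]
    obtain ⟨h2, h1len, h1⟩ := ih hm' row r0 hrow
    set st := (PySem.List.pyRange (i : Int) (m : Int) 1).foldl (innerStep arr) (row, r0) with hst
    have hget : PySem.List.pyGetD arr (m : Int) 0 = arr[m] := by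
      simp [PySem.List.pyGetD, hmlt]
    have hsum : (arr.take (m+1)).sum = (arr.take m).sum + arr[m] := by
      rw [List.sum_take_succ arr m hmlt]
    simp only [List.foldl_cons, List.foldl_nil, innerStep, hget]
    refine ⟨by simp [h2, hsum]; ring, by simp [h1len], ?_⟩
    intro k
    rcases eq_or_ne k m with rfl | hk
    · have hlt : k < st.1.length := by omega
      rw [List.getElem?_set]
      simp [hlt, him, h2, hsum]
      ring
    · rw [List.getElem?_set]
      simp only [Int.toNat_natCast]
      rw [if_neg (fun h => hk h.symm), h1]
      by_cases hc : i ≤ k ∧ k < m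
      · rw [if_pos hc, if_pos ⟨hc.1, by omega⟩]
      · rw [if_neg hc, if_neg (by omega)]

-- A's outer loop: row i of the table gets the inner loop's result, run on dp0[i]
lemma outer_spec (arr : List Int) :
    ∀ (m : Nat) (dp0 : List (List Int)), m ≤ dp0.length →
    (((PySem.List.pyRange 0 (m : Int) 1).foldl (outerStep arr) dp0).length = dp0.length) ∧
    (∀ k : Nat, ((PySem.List.pyRange 0 (m : Int) 1).foldl (outerStep arr) dp0)[k]?
        = if k < m then
            some (((PySem.List.pyRange (k : Int) (arr.length : Int) 1).foldl (innerStep arr)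
              ((dp0[k]?).getD [], 0)).1)
          else dp0[k]?) := by
  intro m
  induction m with
  | zero =>
    intro dp0 _
    rw [show ((0 : Nat) : Int) = 0 by simp, PySem.List.pyRange_one_eq_nil (le_refl 0)]
    simp
  | succ m ih =>
    intro dp0 hm
    have hcast : ((m + 1 : Nat) : Int) = (m : Int) + 1 := by push_cast; ring
    rw [hcast, PySem.List.pyRange_one_succ_right (by positivity), List.foldl_append]
    obtain ⟨hlen, hpt⟩ := ih dp0 (by omega)
    set dpPrev := (PySem.List.pyRange 0 (m : Int) 1).foldl (outerStep arr) dp0 with hdp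
    have hmk : dpPrev[m]? = dp0[m]? := by rw [hpt]; simp
    simp only [List.foldl_cons, List.foldl_nil, outerStep, Int.toNat_natCast]
    refine ⟨by simp [hlen], ?_⟩
    intro k
    rw [List.getElem?_set]
    rcases eq_or_ne k m with rfl | hk
    · rw [if_pos rfl, if_pos (by omega), hmk]
      simp
    · rw [if_neg (fun h => hk h.symm), hpt]
      by_cases hc : k < m
      · rw [if_pos hc, if_pos (by omega)]
      · rw [if_neg hc, if_neg (by omega)]

-- B's append loop builds the prefix-sum list
lemma foldlP (l : List Int) : ∀ (Q : List Int) (a : Int),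
    l.foldl altStepP (Q ++ [a]) =
      (Q ++ [a]) ++ (List.range l.length).map (fun k => a + (l.take (k+1)).sum) := by
  induction l with
  | nil => intro Q a; simp
  | cons x l ih =>
    intro Q a
    have hlast : PySem.List.pyGetD (Q ++ [a]) (-1) 0 = a := by
      simp [PySem.List.pyGetD, PySem.List.pyGet?_neg_one_append_singleton]
    simp only [List.foldl_cons, altStepP, hlast]
    rw [ih (Q ++ [a]) (a + x)]
    rw [List.length_cons, List.range_succ_eq_map, List.map_cons, List.map_map]
    simp [List.append_assoc]
    intro b _
    ring

lemma P_eq (arr : List Int) :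
    arr.foldl altStepP [0] = (List.range (arr.length + 1)).map (fun k => ((arr.take k).sum : Int)) := by
  have := foldlP arr [] 0
  simp only [List.nil_append] at this
  rw [this, List.range_succ_eq_map, List.map_cons, List.map_map]
  simp

-- ===== VERDICT (by name: the statement is the Claim_ definition above) =====
theorem get_dp3_spec : Claim_equal_get_dp3 := by
  intro arr _
  unfold Spec_get_dp3
  set n := arr.length with hn
  set P := arr.foldl altStepP [0] with hPdef
  have hrange : PySem.List.pyRange 0 (n : Int) 1 = List.map (fun k : Nat => (k : Int)) (List.range n) := by
    rw [PySem.List.pyRange_one]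
    simp only [sub_zero, Int.toNat_natCast]
    exact List.map_congr_left (fun a _ => by ring)
  set zrow := (PySem.List.pyRange 0 (n : Int) 1).map (fun _ => (0 : Int)) with hzrow
  set dp0 := (PySem.List.pyRange 0 (n : Int) 1).map (fun _ => zrow) with hdp0
  have hzrep : zrow = List.replicate n (0 : Int) := by
    refine List.eq_replicate_iff.mpr ⟨by simp [hzrow, hrange], ?_⟩
    intro b hb
    rw [hzrow] at hb
    have := hb; simp at this; exact this.2
  have hdp0rep : dp0 = List.replicate n zrow := by
    refine List.eq_replicate_iff.mpr ⟨by simp [hdp0, hrange], ?_⟩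
    intro b hb
    rw [hdp0] at hb
    have := hb; simp at this; exact this.2
  have hzlen : zrow.length = n := by simp [hzrep]
  have hdp0len : dp0.length = n := by simp [hdp0rep]
  have hz : ∀ k : Nat, zrow[k]? = if k < n then some (0 : Int) else none := by
    intro k
    rw [hzrep, List.getElem?_replicate]
  have hP : ∀ k : Nat, k ≤ n → PySem.List.pyGetD P (k : Int) 0 = (arr.take k).sum := by
    intro k hk
    rw [hPdef, P_eq, PySem.List.pyGetD_of_nonneg _ _ (by positivity)]
    simp only [Int.toNat_natCast]
    rw [List.getD_eq_getElem?_getD, List.getElem?_map, List.getElem?_range (by omega)]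
    simp
  obtain ⟨hAlen, hApt⟩ := outer_spec arr n dp0 (le_of_eq hdp0len.symm)
  have hA : get_dp3 arr = (PySem.List.pyRange 0 (n : Int) 1).foldl (outerStep arr) dp0 := rfl
  have hB : get_dp3_alt arr = (PySem.List.pyRange 0 (n : Int) 1).map (fun i =>
      (PySem.List.pyRange 0 (n : Int) 1).map (fun j =>
        if i ≤ j then PySem.List.pyGetD P (j + 1) 0 - PySem.List.pyGetD P i 0 else 0)) := rfl
  rw [hA, hB]
  apply List.ext_getElem?
  intro i
  rw [hApt i]
  conv_rhs => rw [hrange, List.map_map, List.getElem?_map]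
  by_cases hi : i < n
  · rw [List.getElem?_range hi]
    have hdp0i : dp0[i]? = some zrow := by
      rw [hdp0rep, List.getElem?_replicate, if_pos hi]
    rw [if_pos hi, hdp0i]
    simp only [Option.getD_some, Option.map_some, Function.comp_apply]
    congr 1
    obtain ⟨_, hilen, hipt⟩ :=
      inner_spec arr i n (le_of_lt hi) (le_refl n) zrow 0 hzlen
    apply List.ext_getElem?
    intro k
    rw [hipt k]
    conv_rhs => rw [List.map_map, List.getElem?_map]
    by_cases hk : k < n
    · rw [List.getElem?_range hk]
      simp only [Option.map_some, Function.comp_apply]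
      by_cases hik : i ≤ k
      · rw [if_pos ⟨hik, hk⟩]
        have h1 : PySem.List.pyGetD P ((k : Int) + 1) 0 = (arr.take (k + 1)).sum := by
          rw [show ((k : Int) + 1) = ((k + 1 : Nat) : Int) by push_cast; ring]
          exact hP (k + 1) (by omega)
        have h2 : PySem.List.pyGetD P (i : Int) 0 = (arr.take i).sum := hP i (by omega)
        rw [if_pos (by exact_mod_cast hik), h1, h2]
        simp
      · rw [if_neg (by omega), if_neg (by exact_mod_cast hik), hz k, if_pos hk]
    · rw [if_neg (by omega), hz k, if_neg hk,
        List.getElem?_eq_none (by simpa using Nat.le_of_not_lt hk)]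
      simp
  · rw [if_neg hi, hdp0rep, List.getElem?_replicate, if_neg hi,
      List.getElem?_eq_none (by simpa using Nat.le_of_not_lt hi)]
    simp
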